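-- pv_equiv track=rewrite | github.com/GiuseppeMarra/nmln | kbc/kbc_utils.py | find_threshold_old
-- ===== SOURCE A (Python) =====
-- def find_threshold_old(t, f):
--     # Brute force. It can be done much faster with a smarter strategy.
--
--     best_th = 0
--     best_c = 0
--     for T in t:
--         c = 0
--         for T1 in t:
--             if T1 >= T:
--                 c += 1
--         for F1 in f:
--             if F1 < T:
--                 c += 1
--         if c > best_c:
--             best_c = c
--             best_th = T
--     return best_th
-- ===== SOURCE B (Python) =====
-- def find_threshold_old(t, f):
--     # Sort once, then binary-search per candidate threshold (hand-written
--     # bisect_left: A imports nothing, so the bisect module is not used).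
--     st = sorted(t)
--     sf = sorted(f)
--
--     def bl(a, x):
--         # index of the first element of sorted a that is >= x
--         lo, hi = 0, len(a)
--         while lo < hi:
--             mid = (lo + hi) // 2
--             if a[mid] < x:
--                 lo = mid + 1
--             else:
--                 hi = mid
--         return lo
--
--     best_th = 0
--     best_c = 0
--     for T in t:
--         c = (len(st) - bl(st, T)) + bl(sf, T)
--         if c > best_c:
--             best_c = c
--             best_th = T
--     return best_th
-- ===== Notes on version B (the rewrite author's own statement) =====
-- stated objective: faster
-- what changed: Replaces the per-candidate linear scans of t and f by sorting both lists once and counting elements >= T and < T with a binary search, keeping A's first-strictly-better tie rule over t's original order.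
import Mathlib
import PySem

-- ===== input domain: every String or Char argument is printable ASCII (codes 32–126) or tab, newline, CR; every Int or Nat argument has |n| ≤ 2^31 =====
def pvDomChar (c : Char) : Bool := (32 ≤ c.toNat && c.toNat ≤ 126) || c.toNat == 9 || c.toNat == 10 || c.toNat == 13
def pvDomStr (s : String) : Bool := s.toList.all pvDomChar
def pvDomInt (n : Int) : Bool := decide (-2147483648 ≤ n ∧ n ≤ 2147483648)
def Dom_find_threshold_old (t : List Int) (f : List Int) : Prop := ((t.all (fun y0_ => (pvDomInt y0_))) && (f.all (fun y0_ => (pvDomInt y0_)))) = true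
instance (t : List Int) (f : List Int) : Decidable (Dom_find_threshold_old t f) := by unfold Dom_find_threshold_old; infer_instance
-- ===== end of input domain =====

-- B sorts t and f once and counts per-threshold with a binary search instead of
-- A's per-threshold linear scans (objective: faster, asymptotic).

-- ===== PORT A =====
def find_threshold_old (t : List Int) (f : List Int) : Int :=
  -- state (best_th, best_c); for T in t: count t-elements ≥ T, then f-elements < T
  (t.foldl (fun (b : Int × Int) T =>
    let c : Int := t.foldl (fun c T1 => if T1 ≥ T then c + 1 else c) 0
    let c : Int := f.foldl (fun c F1 => if F1 < T then c + 1 else c) c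
    if c > b.2 then (T, c) else b) ((0 : Int), (0 : Int))).1

-- ===== PORT B =====
-- hand-written bisect_left loop of Source B (lo/hi while-loop), step for step
-- fuel = hi - lo bound (totality device only; never reached with fuel ≥ hi - lo)
def blAux (a : List Int) (x : Int) : Nat → Nat → Nat → Nat
  | 0, lo, _hi => lo
  | Nat.succ fuel, lo, hi =>
    if lo < hi then
      let mid := (lo + hi) / 2
      if a.getD mid 0 < x then blAux a x fuel (mid + 1) hi else blAux a x fuel lo mid
    else lo

def bl (a : List Int) (x : Int) : Nat := blAux a x a.length 0 a.length

def find_threshold_old_alt (t : List Int) (f : List Int) : Int :=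
  let st := PySem.List.sorted t (fun y => y) false
  let sf := PySem.List.sorted f (fun y => y) false
  (t.foldl (fun (b : Int × Int) T =>
    let c : Int := ((st.length : Int) - (bl st T : Int)) + (bl sf T : Int)
    if c > b.2 then (T, c) else b) ((0 : Int), (0 : Int))).1

-- ===== PRECONDITION & SPEC =====
def Spec_find_threshold_old (t : List Int) (f : List Int) (out : Int) : Prop := out = find_threshold_old_alt t f
instance (t : List Int) (f : List Int) (out : Int) : Decidable (Spec_find_threshold_old t f out) := by unfold Spec_find_threshold_old; infer_instance

-- ===== CLAIM (what is proved, stated in full; the proofs are below) =====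
def Claim_equal_find_threshold_old : Prop := ∀ (t : List Int) (f : List Int), Dom_find_threshold_old t f → Spec_find_threshold_old t f (find_threshold_old t f)

-- ===== LEMMAS AND PROOFS =====

-- a list split at r into elements < x and elements ≥ x has exactly r elements < x
lemma countP_split (x : Int) : ∀ (a : List Int) (r : Nat), r ≤ a.length →
    (∀ i (h : i < a.length), i < r → a[i] < x) →
    (∀ i (h : i < a.length), r ≤ i → x ≤ a[i]) →
    a.countP (fun y => decide (y < x)) = r := by
  intro a
  induction a with
  | nil => intro r hr _ _; simpa using (Nat.le_zero.mp hr).symm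
  | cons y l ih =>
    intro r hr hlt hge
    cases r with
    | zero =>
      have hy : x ≤ y := hge 0 (by simp) (Nat.zero_le _)
      have hy' : ¬ (y < x) := not_lt.mpr hy
      have : l.countP (fun y => decide (y < x)) = 0 := by
        apply ih 0 (Nat.zero_le _) (by omega)
        intro i h _
        simpa using hge (i + 1) (by simpa using Nat.succ_lt_succ h) (Nat.zero_le _)
      simp [this, hy']
    | succ r' =>
      have hy : y < x := hlt 0 (by simp) (Nat.succ_pos _)
      have : l.countP (fun y => decide (y < x)) = r' := by
        apply ih r' (by simpa using hr)
        · intro i h hi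
          simpa using hlt (i + 1) (by simpa using Nat.succ_lt_succ h) (by omega)
        · intro i h hi
          simpa using hge (i + 1) (by simpa using Nat.succ_lt_succ h) (by omega)
      simp [this, hy]
lemma blAux_eq (a : List Int) (x : Int) (hs : a.Pairwise (· ≤ ·)) :
    ∀ n lo hi, hi - lo ≤ n → lo ≤ hi → hi ≤ a.length →
    (∀ i (h : i < a.length), i < lo → a[i] < x) →
    (∀ i (h : i < a.length), hi ≤ i → x ≤ a[i]) →
    blAux a x n lo hi = a.countP (fun y => decide (y < x)) := by
  have hpw := List.pairwise_iff_getElem.mp hs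
  intro n
  induction n with
  | zero =>
    intro lo hi hn hlh hha hlt hge
    simp only [blAux]
    exact (countP_split x a lo (by omega) hlt (by intro i h hi; exact hge i h (by omega))).symm
  | succ n ih =>
    intro lo hi hn hlh hha hlt hge
    simp only [blAux]
    by_cases h : lo < hi
    · simp only [h, if_true]
      have hmlt : (lo + hi) / 2 < a.length := by omega
      have hgd : a.getD ((lo + hi) / 2) 0 = a[(lo + hi) / 2] := List.getD_eq_getElem a 0 hmlt
      by_cases hc : a.getD ((lo + hi) / 2) 0 < x
      · simp only [hc, if_true]
        apply ih ((lo + hi) / 2 + 1) hi (by omega) (by omega) hha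
        · intro i hia hi2
          rcases Nat.lt_or_ge i ((lo + hi) / 2) with hi' | hi'
          · exact lt_of_le_of_lt (hpw i ((lo + hi) / 2) hia hmlt hi') (hgd ▸ hc)
          · have : i = (lo + hi) / 2 := by omega
            subst this; exact hgd ▸ hc
        · exact hge
      · simp only [hc, if_false]
        apply ih lo ((lo + hi) / 2) (by omega) (by omega) (by omega) hlt
        · intro i hia hi2
          have hmx : x ≤ a[(lo + hi) / 2] := by rw [← hgd]; omega
          rcases Nat.lt_or_ge ((lo + hi) / 2) i with hi' | hi'
          · exact le_trans hmx (hpw ((lo + hi) / 2) i hmlt hia hi')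
          · have : i = (lo + hi) / 2 := by omega
            subst this; exact hmx
    · simp only [h, if_false]
      exact (countP_split x a lo (by omega) hlt
        (by intro i hia hi; exact hge i hia (by omega))).symm

lemma bl_eq (a : List Int) (x : Int) (hs : a.Pairwise (· ≤ ·)) :
    bl a x = a.countP (fun y => decide (y < x)) := by
  apply blAux_eq a x hs a.length 0 a.length (by omega) (by omega) (le_refl _)
  · intro i _ hi; omega
  · intro i h hi; omega

theorem find_threshold_old_spec : Claim_equal_find_threshold_old := by
  unfold Claim_equal_find_threshold_old
  intro t f _
  unfold Spec_find_threshold_old find_threshold_old find_threshold_old_alt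
  congr 1
  apply PySem.List.foldl_congr_mem
  intro acc T _
  have hA : (f.foldl (fun c F1 => if F1 < T then c + 1 else c)
      (t.foldl (fun c T1 => if T1 ≥ T then c + 1 else c) (0 : Int)))
      = (t.countP (fun y => decide (y ≥ T)) : Int) + (f.countP (fun y => decide (y < T)) : Int) := by
    rw [PySem.List.foldl_ite_add_one, PySem.List.foldl_ite_add_one]
    ring
  have hst : (PySem.List.sorted t (fun y => y) false).Pairwise (· ≤ ·) :=
    PySem.List.sorted_pairwise t (fun y => y)
  have hsf : (PySem.List.sorted f (fun y => y) false).Pairwise (· ≤ ·) :=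
    PySem.List.sorted_pairwise f (fun y => y)
  have hstp : (PySem.List.sorted t (fun y => y) false).Perm t := PySem.List.sorted_perm t _ _
  have hsfp : (PySem.List.sorted f (fun y => y) false).Perm f := PySem.List.sorted_perm f _ _
  have hBt : bl (PySem.List.sorted t (fun y => y) false) T = t.countP (fun y => decide (y < T)) := by
    rw [bl_eq _ _ hst, hstp.countP_eq]
  have hBf : bl (PySem.List.sorted f (fun y => y) false) T = f.countP (fun y => decide (y < T)) := by
    rw [bl_eq _ _ hsf, hsfp.countP_eq]
  have hlen : (PySem.List.sorted t (fun y => y) false).length = t.length := hstp.length_eq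
  have hsum : t.countP (fun y => decide (y < T)) + t.countP (fun y => decide (y ≥ T)) = t.length := by
    have h := List.length_eq_countP_add_countP (p := fun y => decide (y < T)) (l := t)
    have hc : t.countP (fun a => decide (¬ decide (a < T) = true)) = t.countP (fun y => decide (y ≥ T)) := by
      apply List.countP_congr
      intro y _
      by_cases hy : y < T
      · simp [hy, ge_iff_le, not_le.mpr hy]
      · simp [hy, ge_iff_le, not_lt.mp hy]
    omega
  have hle : t.countP (fun y => decide (y < T)) ≤ t.length := List.countP_le_length
  have hc2 : ((((PySem.List.sorted t (fun y => y) false).length : Int) - (bl (PySem.List.sorted t (fun y => y) false) T : Int)) + (bl (PySem.List.sorted f (fun y => y) false) T : Int))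
      = (t.countP (fun y => decide (y ≥ T)) : Int) + (f.countP (fun y => decide (y < T)) : Int) := by
    rw [hBt, hBf, hlen]
    omega
  simp only [hA, hc2]
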